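-- pv_equiv track=rewrite | github.com/20201019/try0916 | Oct_into_bin.py | oct_into_bin_func_1
-- ===== SOURCE A (Python) =====
-- def oct_into_bin_func_1(m:int):
--     a=0
--     i=0
--     n=abs(m)
--     x,y=n // 2, n % 2
--
--     while x!=0 :
--
--         a+=10**i*y
--
--         i+=1
--         n=x
--
--         x,y=n // 2, n % 2
--
--     a+=10**i*y
--     if m<0:
--         a=-1*a
--
--     return a
-- ===== SOURCE B (Python) =====
-- def oct_into_bin_func_1(m: int):
--     d = int(format(abs(m), 'b'))
--     return -d if m < 0 else d
-- ===== Notes on version B (the rewrite author's own statement) =====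
-- stated objective: idiomatic
-- what changed: Replaces A's LSB-first bit-extraction while-loop with 10**i packing by a single library binary conversion (format(abs(m),'b')) reparsed as a decimal int, negated for negative m.
import Mathlib
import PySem

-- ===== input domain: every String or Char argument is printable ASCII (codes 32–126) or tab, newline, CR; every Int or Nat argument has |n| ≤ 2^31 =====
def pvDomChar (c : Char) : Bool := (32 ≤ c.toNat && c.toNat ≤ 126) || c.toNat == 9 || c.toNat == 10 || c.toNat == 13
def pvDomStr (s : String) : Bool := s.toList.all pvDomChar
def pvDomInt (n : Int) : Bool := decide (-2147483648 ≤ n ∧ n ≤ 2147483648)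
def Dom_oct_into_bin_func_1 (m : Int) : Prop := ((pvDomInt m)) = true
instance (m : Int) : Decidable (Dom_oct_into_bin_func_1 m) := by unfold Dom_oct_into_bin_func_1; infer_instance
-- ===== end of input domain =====

-- B replaces A's LSB-first bit-extraction loop (packing bits with 10**i) by the
-- idiomatic library conversion int(format(abs(m),'b')) with a final negation for m < 0.


-- ===== PORT A =====
-- A's while loop: state (x, y, a, i); while x ≠ 0: a += 10^i*y; i += 1; x, y = x // 2, x % 2;
-- on exit a += 10^i*y.  n = abs(m) is nonnegative throughout, so the loop variables x, y are
-- carried as Nat (Python's // and % on nonnegative ints coincide with Nat division; exact).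
def octLoopA (x y : Nat) (a : Int) (i : Nat) : Int :=
  if x = 0 then a + 10 ^ i * (y : Int)
  else octLoopA (x / 2) (x % 2) (a + 10 ^ i * (y : Int)) (i + 1)

def oct_into_bin_func_1 (m : Int) : Int :=
  let n := m.natAbs
  let x := n / 2
  let y := n % 2
  let a := octLoopA x y 0 0
  if m < 0 then -1 * a else a

-- ===== PORT B =====
-- Source B: d = int(format(abs(m), 'b')); return -d if m < 0 else d
-- format(n,'b') ported by hand (exact): MSB-first binary digit chars of n, '0' for n = 0.
def binCharsCore (n : Nat) : List Char :=
  if n = 0 then []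
  else binCharsCore (n / 2) ++ [if n % 2 = 1 then '1' else '0']

def binChars (n : Nat) : List Char :=
  if n = 0 then ['0'] else binCharsCore n

-- int(<digit string>) on the all-digit string format produces: exact decimal fold.
def decOfDigits (cs : List Char) : Int :=
  cs.foldl (fun acc c => acc * 10 + ((c.toNat : Int) - 48)) 0

def oct_into_bin_func_1_alt (m : Int) : Int :=
  let d := decOfDigits (binChars m.natAbs)
  if m < 0 then -d else d

-- ===== PRECONDITION & SPEC =====
def Spec_oct_into_bin_func_1 (m : Int) (out : Int) : Prop := out = oct_into_bin_func_1_alt m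
instance (m : Int) (out : Int) : Decidable (Spec_oct_into_bin_func_1 m out) := by unfold Spec_oct_into_bin_func_1; infer_instance

-- ===== CLAIM (what is proved, stated in full; the proofs are below) =====
def Claim_equal_oct_into_bin_func_1 : Prop := ∀ (m : Int), Dom_oct_into_bin_func_1 m → Spec_oct_into_bin_func_1 m (oct_into_bin_func_1 m)

-- ===== LEMMAS AND PROOFS =====

-- the common mathematical value: decimal packing of the binary digits of n
def binPack (n : Nat) : Int :=
  if n ≤ 1 then (n : Int) else 10 * binPack (n / 2) + (n % 2 : Nat)

theorem binPack_of_le {n : Nat} (h : n ≤ 1) : binPack n = (n : Int) := by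
  rw [binPack.eq_def, if_pos h]

theorem binPack_of_gt {n : Nat} (h : ¬ n ≤ 1) :
    binPack n = 10 * binPack (n / 2) + (n % 2 : Nat) := by
  rw [binPack.eq_def, if_neg h]

theorem octLoopA_eq (n : Nat) : ∀ (a : Int) (i : Nat),
    octLoopA (n / 2) (n % 2) a i = a + 10 ^ i * binPack n := by
  induction n using Nat.strong_induction_on with
  | _ n ih =>
    intro a i
    by_cases h1 : n ≤ 1
    · have h2 : n / 2 = 0 := by omega
      have h3 : n % 2 = n := by omega
      rw [octLoopA.eq_def, h2, h3, binPack_of_le h1]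
      simp
    · rw [octLoopA.eq_def, if_neg (by omega : ¬ n / 2 = 0), ih (n / 2) (by omega),
        binPack_of_gt h1]
      push_cast
      ring

theorem decOfDigits_core (n : Nat) (hn : 1 ≤ n) :
    ∀ a : Int, (binCharsCore n).foldl (fun acc c => acc * 10 + ((c.toNat : Int) - 48)) a
      = a * 10 ^ (binCharsCore n).length + binPack n := by
  induction n using Nat.strong_induction_on with
  | _ n ih =>
    intro a
    rw [binCharsCore.eq_def, if_neg (by omega)]
    by_cases h1 : n ≤ 1
    · have : n = 1 := by omega
      subst this
      simp [binCharsCore, binPack_of_le (by omega : 1 ≤ 1)]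
    · rw [List.foldl_append]
      have hlen : (binCharsCore (n / 2) ++ [if n % 2 = 1 then '1' else '0']).length
          = (binCharsCore (n / 2)).length + 1 := by simp
      rw [ih (n / 2) (by omega) (by omega) a, hlen, binPack_of_gt h1]
      have hmod : n % 2 = 0 ∨ n % 2 = 1 := by omega
      rcases hmod with h | h <;> simp [h, List.foldl] <;> ring

theorem decOfDigits_binChars (n : Nat) : decOfDigits (binChars n) = binPack n := by
  by_cases h : n = 0
  · subst h; simp [binChars, decOfDigits, binPack]
  · rw [binChars, if_neg h, decOfDigits, decOfDigits_core n (by omega) 0]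
    simp

theorem both_eq (m : Int) :
    oct_into_bin_func_1 m = oct_into_bin_func_1_alt m := by
  unfold oct_into_bin_func_1 oct_into_bin_func_1_alt
  simp only [octLoopA_eq m.natAbs 0 0, decOfDigits_binChars]
  split <;> ring

-- ===== VERDICT (by name: the statement is the Claim_ definition above) =====
theorem oct_into_bin_func_1_spec : Claim_equal_oct_into_bin_func_1 := by
  intro m _
  unfold Spec_oct_into_bin_func_1
  exact both_eq m
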